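-- pv_equiv track=rewrite | github.com/Inevera11/SoftwareMansion | task.py | expose_specific_elements
-- ===== SOURCE A (Python) =====
-- def get_primes(max_num):
--     primes = []
--     for i in range(2, max_num+1):
--         is_num_prime = True
--         for prime in primes:
--             if i % prime == 0:
--                 is_num_prime = False
--                 break
--         if is_num_prime:
--             primes.append(i)
--     return primes
--
-- def expose_specific_elements(list1, list2):
--     primes = get_primes(len(list2))
--     new_list = []
--     for number in list1:
--         if number in list2:
--             quantity = list2.count(number)
--             if quantity in primes:
--                 continue
--         new_list.append(number)
--
--     return new_list
-- ===== SOURCE B (Python) =====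
-- def expose_specific_elements(list1, list2):
--     counts = {}
--     for x in list2:
--         counts[x] = counts.get(x, 0) + 1
--
--     def is_prime(q):
--         if q < 2:
--             return False
--         d = 2
--         while d * d <= q:
--             if q % d == 0:
--                 return False
--             d += 1
--         return True
--
--     return [x for x in list1 if not is_prime(counts.get(x, 0))]
-- ===== Notes on version B (the rewrite author's own statement) =====
-- stated objective: faster
-- what changed: Replace the membership scan + list2.count per element and the incremental sieve with a dict of counts built once and an O(sqrt q) trial-division primality test per element.
import Mathlib
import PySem

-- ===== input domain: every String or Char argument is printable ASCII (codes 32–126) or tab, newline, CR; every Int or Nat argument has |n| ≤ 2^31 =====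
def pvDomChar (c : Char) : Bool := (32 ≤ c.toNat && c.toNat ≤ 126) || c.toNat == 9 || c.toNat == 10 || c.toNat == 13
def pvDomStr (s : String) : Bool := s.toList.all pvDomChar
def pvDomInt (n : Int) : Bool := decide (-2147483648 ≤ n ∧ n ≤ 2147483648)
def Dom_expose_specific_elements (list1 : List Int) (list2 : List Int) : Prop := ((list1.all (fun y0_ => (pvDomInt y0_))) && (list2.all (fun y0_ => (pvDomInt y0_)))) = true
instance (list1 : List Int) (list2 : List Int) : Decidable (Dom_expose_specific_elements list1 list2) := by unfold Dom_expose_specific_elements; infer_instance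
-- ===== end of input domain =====

-- B replaces A's per-element list2 membership/count scans and its incremental trial sieve by a
-- count dictionary built once plus a sqrt-bounded trial-division primality test (objective: faster).

-- ===== PORT A =====

-- inner 'for prime in primes: if i % prime == 0: … break' loop of get_primes
def pvDivAny (i : Int) (primes : List Int) : Bool :=
  match primes with
  | [] => false
  | p :: rest => if PySem.Int.mod i p == 0 then true else pvDivAny i rest

def get_primes (max_num : Int) : List Int :=
  (PySem.List.pyRange 2 (max_num + 1) 1).foldl
    (fun primes i => if pvDivAny i primes then primes else primes ++ [i]) []

def expose_specific_elements (list1 : List Int) (list2 : List Int) : List Int :=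
  let primes := get_primes (list2.length : Int)
  list1.foldl (fun new_list number =>
    if list2.contains number then
      if primes.contains ((list2.count number : Int)) then new_list
      else new_list ++ [number]
    else new_list ++ [number]) []

-- ===== PORT B =====

-- 'while d * d <= q: …' trial-division loop of is_prime
def pvIsPrimeAux (q : Int) (d : Int) : Bool :=
  if h : d * d ≤ q then
    if PySem.Int.mod q d == 0 then false else pvIsPrimeAux q (d + 1)
  else true
termination_by (q + 2 - d).toNat
decreasing_by
  have hd : d ≤ q + 1 := by nlinarith [sq_nonneg (d - 1)]
  omega

def pvIsPrime (q : Int) : Bool :=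
  if q < 2 then false else pvIsPrimeAux q 2

def expose_specific_elements_alt (list1 : List Int) (list2 : List Int) : List Int :=
  let counts := list2.foldl (fun d x => d.insert x (d.getD x 0 + 1)) PySem.Dict.empty
  list1.filter (fun x => !pvIsPrime (counts.getD x 0))

-- ===== PRECONDITION & SPEC =====
def Spec_expose_specific_elements (list1 : List Int) (list2 : List Int) (out : List Int) : Prop := out = expose_specific_elements_alt list1 list2
instance (list1 : List Int) (list2 : List Int) (out : List Int) : Decidable (Spec_expose_specific_elements list1 list2 out) := by unfold Spec_expose_specific_elements; infer_instance

-- ===== CLAIM (what is proved, stated in full; the proofs are below) =====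
def Claim_equal_expose_specific_elements : Prop := ∀ (list1 : List Int) (list2 : List Int), Dom_expose_specific_elements list1 list2 → Spec_expose_specific_elements list1 list2 (expose_specific_elements list1 list2)

-- ===== LEMMAS AND PROOFS =====

-- the counts dict is Counter(list2)
theorem pv_counts_getD (list2 : List Int) (x : Int) :
    (list2.foldl (fun d x => d.insert x (d.getD x 0 + 1)) PySem.Dict.empty).getD x 0
      = (list2.count x : Int) := by
  rw [PySem.Dict.getD_foldl_insert_add_one]
  simp [PySem.Dict.getD_empty]

theorem pvDivAny_iff (i : Int) (P : List Int) :
    pvDivAny i P = true ↔ ∃ p ∈ P, p ∣ i := by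
  induction P with
  | nil => simp [pvDivAny]
  | cons p rest ih =>
    unfold pvDivAny
    by_cases h : p ∣ i
    · have hb : (PySem.Int.mod i p == 0) = true := by
        simp [(PySem.Int.mod_eq_zero_iff_dvd i p).mpr h]
      rw [hb]
      simp only [if_true]
      constructor
      · intro _; exact ⟨p, List.mem_cons_self, h⟩
      · intro _; trivial
    · have hb : (PySem.Int.mod i p == 0) = false := by
        simp [PySem.Int.mod_eq_zero_iff_dvd, h]
      rw [hb]
      simp only [Bool.false_eq_true, if_false, ih]
      constructor
      · rintro ⟨q, hq, hd⟩; exact ⟨q, List.mem_cons_of_mem _ hq, hd⟩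
      · rintro ⟨q, hq, hd⟩
        rcases List.mem_cons.mp hq with rfl | hq
        · exact absurd hd h
        · exact ⟨q, hq, hd⟩

theorem pvIsPrimeAux_iff (q d : Int) (hq : 0 ≤ q) (hd : 2 ≤ d) :
    pvIsPrimeAux q d = true ↔ ∀ e : Int, d ≤ e → e * e ≤ q → ¬ e ∣ q := by
  rw [pvIsPrimeAux]
  by_cases h : d * d ≤ q
  · simp only [h, dite_true]
    by_cases hm : d ∣ q
    · have hb : (PySem.Int.mod q d == 0) = true := by
        simp [(PySem.Int.mod_eq_zero_iff_dvd q d).mpr hm]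
      rw [hb]
      simp only [if_true]
      constructor
      · intro hf; exact absurd hf (by simp)
      · intro hall; exact absurd hm (hall d le_rfl h)
    · have hb : (PySem.Int.mod q d == 0) = false := by
        simp [PySem.Int.mod_eq_zero_iff_dvd, hm]
      rw [hb]
      simp only [Bool.false_eq_true, if_false]
      rw [pvIsPrimeAux_iff q (d + 1) hq (by omega)]
      constructor
      · intro hall e he hee
        rcases eq_or_lt_of_le he with rfl | hlt
        · exact hm
        · exact hall e (by omega) hee
      · intro hall e he hee; exact hall e (by omega) hee
  · simp only [h, dite_false]
    constructor
    · intro _ e he hee hdvd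
      have hde : d * d ≤ e * e := mul_self_le_mul_self (by omega) he
      exact h (le_trans hde hee)
    · intro _; trivial
termination_by (q + 2 - d).toNat
decreasing_by
  have hd' : d ≤ q + 1 := by nlinarith [sq_nonneg (d - 1)]
  omega

theorem pvIsPrime_iff (q : Int) (hq : 0 ≤ q) :
    pvIsPrime q = true ↔ Nat.Prime q.toNat := by
  unfold pvIsPrime
  by_cases h2 : q < 2
  · simp only [h2, if_true]
    constructor
    · intro hf; exact absurd hf (by simp)
    · intro hp; exfalso
      have := hp.two_le
      omega
  · push_neg at h2
    rw [if_neg (by omega), pvIsPrimeAux_iff q 2 hq le_rfl]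
    rw [Nat.prime_def_le_sqrt]
    constructor
    · intro hall
      refine ⟨by omega, fun m hm hms hdvd => ?_⟩
      have hmm : m * m ≤ q.toNat := Nat.le_sqrt.mp hms
      have hmmq : ((m : Int)) * m ≤ q := by
        have h1 : ((m * m : Nat) : Int) ≤ ((q.toNat : Nat) : Int) := by exact_mod_cast hmm
        rw [Int.toNat_of_nonneg hq] at h1
        push_cast at h1
        exact h1
      have hdq : (m : Int) ∣ q := by
        have h1 : (m : Int) ∣ (q.toNat : Int) := Int.natCast_dvd_natCast.mpr hdvd
        rwa [Int.toNat_of_nonneg hq] at h1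
      exact hall m (by exact_mod_cast hm) hmmq hdq
    · rintro ⟨-, hall⟩ e he hee hdvd
      have he0 : 0 ≤ e := by omega
      have hdn : e.toNat ∣ q.toNat := by
        rcases hdvd with ⟨c, hc⟩
        have hc0 : 0 ≤ c := by nlinarith
        refine ⟨c.toNat, ?_⟩
        have h1 : ((e.toNat * c.toNat : Nat) : Int) = q := by
          push_cast [Int.toNat_of_nonneg he0, Int.toNat_of_nonneg hc0]
          omega
        omega
      refine hall e.toNat (by omega) (Nat.le_sqrt.mpr ?_) hdn
      have h1 : ((e.toNat * e.toNat : Nat) : Int) ≤ q := by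
        push_cast [Int.toNat_of_nonneg he0]; exact hee
      omega

-- sieve characterisation: get_primes n holds exactly the primes in [2, n]
theorem get_primes_mem (m : Nat) (q : Int) :
    q ∈ get_primes (m : Int) ↔ 2 ≤ q ∧ q ≤ (m : Int) ∧ Nat.Prime q.toNat := by
  induction m generalizing q with
  | zero =>
    have h0 : get_primes ((0 : Nat) : Int) = [] := by norm_num; decide
    rw [h0]
    simp only [List.not_mem_nil, false_iff]
    rintro ⟨h1, h2, -⟩
    omega
  | succ k ih =>
    by_cases hk : k = 0
    · subst hk
      have h1 : get_primes ((0 + 1 : Nat) : Int) = [] := by norm_num; decide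
      rw [h1]
      simp only [List.not_mem_nil, false_iff]
      rintro ⟨ha, hb, -⟩
      omega
    · have hk2 : (2 : Int) ≤ (k : Int) + 1 := by omega
      have hsplit : PySem.List.pyRange 2 ((k : Int) + 1 + 1)
          = PySem.List.pyRange 2 ((k : Int) + 1) ++ [(k : Int) + 1] := by
        rw [PySem.List.pyRange_one_append 2 ((k : Int) + 1) ((k : Int) + 1 + 1) hk2 (by omega)]
        congr 1
        rw [PySem.List.pyRange_one_cons (by omega)]
        rw [PySem.List.pyRange_one_eq_nil (by omega)]
      have hrec : get_primes ((k + 1 : Nat) : Int)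
          = (if pvDivAny ((k : Int) + 1) (get_primes (k : Int)) then get_primes (k : Int)
             else get_primes (k : Int) ++ [(k : Int) + 1]) := by
        unfold get_primes
        push_cast
        rw [hsplit, List.foldl_append]
        simp
      rw [hrec]
      by_cases hp : Nat.Prime (k + 1)
      · have hdiv : pvDivAny ((k : Int) + 1) (get_primes (k : Int)) = false := by
          rw [Bool.eq_false_iff]
          intro hT
          rcases (pvDivAny_iff _ _).mp hT with ⟨p, hpmem, hpdvd⟩
          rcases (ih p).mp hpmem with ⟨hp2, hpk, hpprime⟩
          have hdn : p.toNat ∣ k + 1 := by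
            rcases hpdvd with ⟨c, hc⟩
            have hc0 : 0 ≤ c := by nlinarith
            refine ⟨c.toNat, ?_⟩
            have h1 : ((p.toNat * c.toNat : Nat) : Int) = (k : Int) + 1 := by
              push_cast [Int.toNat_of_nonneg (by omega : (0:Int) ≤ p), Int.toNat_of_nonneg hc0]
              omega
            omega
          rcases Nat.Prime.eq_one_or_self_of_dvd hp p.toNat hdn with h1 | hself
          · omega
          · omega
        rw [hdiv]
        simp only [Bool.false_eq_true, if_false, List.mem_append, List.mem_singleton, ih]
        constructor
        · rintro (⟨h1, h2, h3⟩ | rfl)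
          · exact ⟨h1, by omega, h3⟩
          · refine ⟨by omega, by omega, ?_⟩
            have hcast : ((k : Int) + 1).toNat = k + 1 := by omega
            rw [hcast]; exact hp
        · rintro ⟨h1, h2, h3⟩
          by_cases hq : q = (k : Int) + 1
          · right; exact hq
          · left; exact ⟨h1, by omega, h3⟩
      · have hdiv : pvDivAny ((k : Int) + 1) (get_primes (k : Int)) = true := by
          rw [pvDivAny_iff]
          have h2n : 2 ≤ k + 1 := by omega
          have hmf : Nat.minFac (k + 1) < k + 1 :=
            (Nat.not_prime_iff_minFac_lt h2n).mp hp
          have hmfp : Nat.Prime (Nat.minFac (k + 1)) := Nat.minFac_prime (by omega)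
          refine ⟨(Nat.minFac (k + 1) : Int), ?_, ?_⟩
          · rw [ih]
            refine ⟨by exact_mod_cast hmfp.two_le, by exact_mod_cast (by omega : Nat.minFac (k+1) ≤ k), by simp [hmfp]⟩
          · have hd := Nat.minFac_dvd (k + 1)
            have h1 : ((Nat.minFac (k+1) : Nat) : Int) ∣ ((k + 1 : Nat) : Int) := Int.natCast_dvd_natCast.mpr hd
            push_cast at h1
            exact h1
        rw [hdiv, if_pos rfl, ih]
        constructor
        · rintro ⟨h1, h2, h3⟩; exact ⟨h1, by omega, h3⟩
        · rintro ⟨h1, h2, h3⟩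
          refine ⟨h1, ?_, h3⟩
          by_contra hgt
          push_neg at hgt
          have heq : q = (k : Int) + 1 := by omega
          subst heq
          have hcast : ((k : Int) + 1).toNat = k + 1 := by omega
          rw [hcast] at h3
          exact hp h3

-- pointwise agreement of the two keep-conditions
theorem pv_cond_eq (list2 : List Int) (x : Int) :
    (list2.contains x && (get_primes (list2.length : Int)).contains ((list2.count x : Int)))
      = pvIsPrime ((list2.count x : Int)) := by
  by_cases hmem : x ∈ list2
  · have hc1 : list2.contains x = true := by simpa using hmem
    have hcpos : 1 ≤ list2.count x := List.one_le_count_iff.mpr hmem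
    have hcle : list2.count x ≤ list2.length := List.count_le_length
    rw [hc1, Bool.true_and]
    by_cases hp : pvIsPrime ((list2.count x : Int)) = true
    · rw [hp]
      have hprime := (pvIsPrime_iff _ (by positivity)).mp hp
      simp only [List.contains_eq_mem, decide_eq_true_eq]
      rw [get_primes_mem]
      have h2 : 2 ≤ (list2.count x : Int) := by
        have := hprime.two_le
        omega
      exact ⟨h2, by exact_mod_cast hcle, hprime⟩
    · rw [Bool.eq_false_iff.mpr hp]
      simp only [List.contains_eq_mem, decide_eq_false_iff_not]
      rw [get_primes_mem]
      rintro ⟨h1, h2, h3⟩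
      exact hp ((pvIsPrime_iff _ (by positivity)).mpr h3)
  · have hc1 : list2.contains x = false := by simpa using hmem
    have hc0 : list2.count x = 0 := List.count_eq_zero.mpr hmem
    rw [hc1, Bool.false_and, hc0]
    have : pvIsPrime ((0 : Nat) : Int) = false := by decide
    rw [this]

-- A's accumulating loop is a filter
theorem pv_foldA (list1 : List Int) (c : Int → Bool) :
    list1.foldl (fun new_list number =>
      if c number then new_list else new_list ++ [number]) []
      = list1.filter (fun x => !c x) := by
  have h : ∀ acc, list1.foldl (fun new_list number =>
      if c number then new_list else new_list ++ [number]) acc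
      = acc ++ list1.filter (fun x => !c x) := by
    induction list1 with
    | nil => intro acc; simp
    | cons y ys ih =>
      intro acc
      by_cases hy : c y
      · simp [List.foldl_cons, hy, ih]
      · simp [List.foldl_cons, hy, ih]
  simpa using h []

-- ===== VERDICT (by name: the statement is the Claim_ definition above) =====
theorem expose_specific_elements_spec : Claim_equal_expose_specific_elements := by
  intro list1 list2 _
  unfold Spec_expose_specific_elements expose_specific_elements expose_specific_elements_alt
  simp only []
  have hstep : (fun (new_list : List Int) (number : Int) =>
      if list2.contains number then
        if (get_primes (list2.length : Int)).contains ((list2.count number : Int)) then new_list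
        else new_list ++ [number]
      else new_list ++ [number])
    = (fun (new_list : List Int) (number : Int) =>
        if (list2.contains number && (get_primes (list2.length : Int)).contains ((list2.count number : Int))) then new_list
        else new_list ++ [number]) := by
    funext acc x
    by_cases hx : x ∈ list2 <;>
      by_cases hy : ((list2.count x : Int)) ∈ get_primes ((list2.length : Int)) <;>
      simp [hx, hy]
  rw [hstep, pv_foldA]
  apply List.filter_congr
  intro x _
  rw [pv_cond_eq, pv_counts_getD]
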